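-- pv_equiv track=rewrite | github.com/loicSchussler/interpolation | vercel-python-app/venv/imageScanner/main.py | convert_note_track_to_note_and_duration
-- ===== SOURCE A (Python) =====
-- def merge_none_notes(noteTrack):
--     newNoteTrack = []
--     totalDuration = 0
--     for i in range(len(noteTrack)):
--         if noteTrack[i][0] != 'None':
--             if totalDuration > 0:
--                 newNoteTrack.append(('None', totalDuration))
--                 newNoteTrack.append(noteTrack[i])
--                 totalDuration = 0
--             else:
--                 newNoteTrack.append(noteTrack[i])
--         else:
--             totalDuration += noteTrack[i][1]
--
--     if totalDuration > 0:
--         newNoteTrack.append(('None', totalDuration))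
--
--     return newNoteTrack
--
-- def convert_note_track_to_note_and_duration(noteTrack):
-- # Convert the note track to a list of nodes and durations
--     res = []
--     duration = 0
--     lastNote = noteTrack[0][0]
--     for i in range(0, len(noteTrack)):
--         if noteTrack[i][1]:
--             if (duration == 7):
--                 duration += 1
--             res.append((lastNote, duration))
--             lastNote = noteTrack[i][0]
--             duration = 1
--         else:
--             if noteTrack[i][0] == lastNote:
--                 duration += 1
--             else:
--                 if (duration == 7):
--                     duration += 1
--                 res.append((lastNote, duration))
--                 duration = 0
--                 lastNote = noteTrack[i][0]
--
--     res.append((lastNote, duration))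
--
--     res = merge_none_notes(res)
--
--     return res
-- ===== SOURCE B (Python) =====
-- def convert_note_track_to_note_and_duration(noteTrack):
--     # One fused pass: None-runs are accumulated on the fly instead of a second merge pass.
--     res = []
--     noneAcc = 0
--
--     def emit(note, d):
--         nonlocal noneAcc
--         if note == 'None':
--             noneAcc += d
--         else:
--             if noneAcc > 0:
--                 res.append(('None', noneAcc))
--                 noneAcc = 0
--             res.append((note, d))
--
--     lastNote = noteTrack[0][0]
--     duration = 0
--     for note, val in noteTrack:
--         if val:
--             emit(lastNote, 8 if duration == 7 else duration)
--             lastNote, duration = note, 1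
--         elif note == lastNote:
--             duration += 1
--         else:
--             emit(lastNote, 8 if duration == 7 else duration)
--             lastNote, duration = note, 0
--     emit(lastNote, duration)
--     if noneAcc > 0:
--         res.append(('None', noneAcc))
--     return res
-- ===== Notes on version B (the rewrite author's own statement) =====
-- stated objective: simpler
-- what changed: The separate merge_none_notes second pass is fused into the main loop: a pending None-duration accumulator absorbs 'None' runs on the fly and is flushed as a single ('None', total) entry right before each non-None run, so B builds the final list in one pass.
import Mathlib
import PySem

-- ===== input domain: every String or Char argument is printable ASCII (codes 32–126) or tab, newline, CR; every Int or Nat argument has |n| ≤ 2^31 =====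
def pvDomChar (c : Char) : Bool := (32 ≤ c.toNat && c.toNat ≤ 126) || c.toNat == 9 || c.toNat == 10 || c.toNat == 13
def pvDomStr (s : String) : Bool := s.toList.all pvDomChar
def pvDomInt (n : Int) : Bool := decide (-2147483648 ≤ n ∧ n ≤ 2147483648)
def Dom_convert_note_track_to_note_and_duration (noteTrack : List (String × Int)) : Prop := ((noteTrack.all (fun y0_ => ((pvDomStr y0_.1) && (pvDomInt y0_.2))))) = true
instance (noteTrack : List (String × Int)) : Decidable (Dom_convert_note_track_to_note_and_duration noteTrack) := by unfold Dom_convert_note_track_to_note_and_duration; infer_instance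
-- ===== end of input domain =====

-- B fuses merge_none_notes into the main loop (one pass, a pending None-duration
-- accumulator) instead of A's two passes; objective: simpler/one-pass, same cost class.

-- ===== PORT A =====
-- one iteration of the loop of merge_none_notes; state = (newNoteTrack, totalDuration)
def pvMergeStep (s : List (String × Int) × Int) (p : String × Int) : List (String × Int) × Int :=
  if p.1 ≠ "None" then
    if s.2 > 0 then (s.1 ++ [("None", s.2), p], 0)
    else (s.1 ++ [p], s.2)
  else (s.1, s.2 + p.2)

def merge_none_notes (noteTrack : List (String × Int)) : List (String × Int) :=
  let s := noteTrack.foldl pvMergeStep ([], 0)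
  if s.2 > 0 then s.1 ++ [("None", s.2)] else s.1

-- one iteration of A's main loop; state = (res, duration, lastNote)
def pvStepA (s : List (String × Int) × Int × String) (p : String × Int) :
    List (String × Int) × Int × String :=
  if p.2 ≠ 0 then
    (s.1 ++ [(s.2.2, if s.2.1 = 7 then s.2.1 + 1 else s.2.1)], 1, p.1)
  else if p.1 = s.2.2 then (s.1, s.2.1 + 1, s.2.2)
  else (s.1 ++ [(s.2.2, if s.2.1 = 7 then s.2.1 + 1 else s.2.1)], 0, p.1)

def convert_note_track_to_note_and_duration (noteTrack : List (String × Int)) : List (String × Int) :=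
  match noteTrack with
  | [] => []   -- Python raises IndexError on noteTrack[0]; excluded by Pre_
  | (n0, _) :: _ =>
    let s := noteTrack.foldl pvStepA ([], 0, n0)
    merge_none_notes (s.1 ++ [(s.2.2, s.2.1)])

-- ===== PORT B =====
-- B's emit helper: route 'None' runs into the accumulator, flush it before a real note
def pvEmitB (res : List (String × Int)) (acc : Int) (note : String) (d : Int) :
    List (String × Int) × Int :=
  if note = "None" then (res, acc + d)
  else if acc > 0 then (res ++ [("None", acc), (note, d)], 0)
  else (res ++ [(note, d)], acc)

-- one iteration of B's fused loop; state = (res, noneAcc, duration, lastNote)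
def pvStepB (s : List (String × Int) × Int × Int × String) (p : String × Int) :
    List (String × Int) × Int × Int × String :=
  if p.2 ≠ 0 then
    let e := pvEmitB s.1 s.2.1 s.2.2.2 (if s.2.2.1 = 7 then s.2.2.1 + 1 else s.2.2.1)
    (e.1, e.2, 1, p.1)
  else if p.1 = s.2.2.2 then (s.1, s.2.1, s.2.2.1 + 1, s.2.2.2)
  else
    let e := pvEmitB s.1 s.2.1 s.2.2.2 (if s.2.2.1 = 7 then s.2.2.1 + 1 else s.2.2.1)
    (e.1, e.2, 0, p.1)

def convert_note_track_to_note_and_duration_alt (noteTrack : List (String × Int)) : List (String × Int) :=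
  match noteTrack with
  | [] => []
  | (n0, _) :: _ =>
    let s := noteTrack.foldl pvStepB ([], 0, 0, n0)
    let e := pvEmitB s.1 s.2.1 s.2.2.2 s.2.2.1
    if e.2 > 0 then e.1 ++ [("None", e.2)] else e.1

-- ===== PRECONDITION & SPEC =====
-- Pre_ excludes only the empty list, on which A raises IndexError (noteTrack[0]).
def Pre_convert_note_track_to_note_and_duration (noteTrack : List (String × Int)) : Prop :=
  noteTrack ≠ []
instance (noteTrack : List (String × Int)) : Decidable (Pre_convert_note_track_to_note_and_duration noteTrack) := by unfold Pre_convert_note_track_to_note_and_duration; infer_instance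

def pvWitness_convert_note_track_to_note_and_duration : (List (String × Int)) := [("A", 1), ("None", 0), ("None", 0), ("B", 1)]

def Spec_convert_note_track_to_note_and_duration (noteTrack : List (String × Int)) (out : List (String × Int)) : Prop := out = convert_note_track_to_note_and_duration_alt noteTrack
instance (noteTrack : List (String × Int)) (out : List (String × Int)) : Decidable (Spec_convert_note_track_to_note_and_duration noteTrack out) := by unfold Spec_convert_note_track_to_note_and_duration; infer_instance

-- ===== CLAIM (what is proved, stated in full; the proofs are below) =====
def Claim_equal_convert_note_track_to_note_and_duration : Prop := ∀ (noteTrack : List (String × Int)), Dom_convert_note_track_to_note_and_duration noteTrack → Pre_convert_note_track_to_note_and_duration noteTrack → Spec_convert_note_track_to_note_and_duration noteTrack (convert_note_track_to_note_and_duration noteTrack)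

-- ===== LEMMAS AND PROOFS =====

-- merge's fold over A's res so far
def pvMF (r : List (String × Int)) : List (String × Int) × Int := r.foldl pvMergeStep ([], 0)

theorem pvMergeStep_eq_emitB (s : List (String × Int) × Int) (p : String × Int) :
    pvMergeStep s p = pvEmitB s.1 s.2 p.1 p.2 := by
  unfold pvMergeStep pvEmitB
  by_cases h : p.1 = "None" <;> simp [h]

theorem pvMF_append (r : List (String × Int)) (x : String × Int) :
    pvMF (r ++ [x]) = pvEmitB (pvMF r).1 (pvMF r).2 x.1 x.2 := by
  unfold pvMF
  rw [List.foldl_append]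
  simp [pvMergeStep_eq_emitB]

-- loop invariant: B's fused loop tracks merge_none_notes's fold of A's res
theorem pv_loop_inv (l : List (String × Int)) :
    ∀ (r : List (String × Int)) (dur : Int) (last : String),
    l.foldl pvStepB ((pvMF r).1, (pvMF r).2, dur, last)
      = ((pvMF (l.foldl pvStepA (r, dur, last)).1).1,
         (pvMF (l.foldl pvStepA (r, dur, last)).1).2,
         (l.foldl pvStepA (r, dur, last)).2.1,
         (l.foldl pvStepA (r, dur, last)).2.2) := by
  induction l with
  | nil => intro r dur last; rfl
  | cons p l ih =>
    intro r dur last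
    simp only [List.foldl_cons]
    by_cases h1 : p.2 ≠ 0
    · have hA : pvStepA (r, dur, last) p
          = (r ++ [(last, if dur = 7 then dur + 1 else dur)], 1, p.1) := by
        simp [pvStepA, h1]
      have hB : pvStepB ((pvMF r).1, (pvMF r).2, dur, last) p
          = ((pvMF (r ++ [(last, if dur = 7 then dur + 1 else dur)])).1,
             (pvMF (r ++ [(last, if dur = 7 then dur + 1 else dur)])).2, 1, p.1) := by
        simp [pvStepB, h1, pvMF_append]
      rw [hA, hB, ih]
    · rw [not_not] at h1
      by_cases h2 : p.1 = last
      · have hA : pvStepA (r, dur, last) p = (r, dur + 1, last) := by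
          simp [pvStepA, h1, h2]
        have hB : pvStepB ((pvMF r).1, (pvMF r).2, dur, last) p
            = ((pvMF r).1, (pvMF r).2, dur + 1, last) := by
          simp [pvStepB, h1, h2]
        rw [hA, hB, ih]
      · have hA : pvStepA (r, dur, last) p
            = (r ++ [(last, if dur = 7 then dur + 1 else dur)], 0, p.1) := by
          simp [pvStepA, h1, h2]
        have hB : pvStepB ((pvMF r).1, (pvMF r).2, dur, last) p
            = ((pvMF (r ++ [(last, if dur = 7 then dur + 1 else dur)])).1,
               (pvMF (r ++ [(last, if dur = 7 then dur + 1 else dur)])).2, 0, p.1) := by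
          simp [pvStepB, h1, h2, pvMF_append]
        rw [hA, hB, ih]

-- ===== VERDICT (by name: the statement is the Claim_ definition above) =====
theorem convert_note_track_to_note_and_duration_spec : Claim_equal_convert_note_track_to_note_and_duration := by
  intro noteTrack _ hpre
  unfold Spec_convert_note_track_to_note_and_duration
  match noteTrack with
  | [] => exact absurd rfl hpre
  | (n0, v0) :: t =>
    unfold convert_note_track_to_note_and_duration convert_note_track_to_note_and_duration_alt
    simp only
    have h0 : (([], (0 : Int), (0 : Int), n0) : List (String × Int) × Int × Int × String)
        = ((pvMF []).1, (pvMF []).2, (0 : Int), n0) := rfl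
    rw [h0, pv_loop_inv]
    set sA := ((n0, v0) :: t).foldl pvStepA ([], 0, n0) with hsA
    unfold merge_none_notes
    simp only [show List.foldl pvMergeStep ([], 0) (sA.1 ++ [(sA.2.2, sA.2.1)])
        = pvEmitB (pvMF sA.1).1 (pvMF sA.1).2 sA.2.2 sA.2.1 from pvMF_append sA.1 (sA.2.2, sA.2.1)]
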